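-- pv_equiv track=rewrite | github.com/guilopgar/CANTEMIST-2020 | ICB-UMA/nlp_utils_test.py | ss_fragment_greedy
-- ===== SOURCE A (Python) =====
-- def ss_fragment_greedy(ss_token, ss_start_end, max_seq_len):
--     """
--     ss_token and ss_start_end: list of lists of sub-tokenized sentences.
--
--     return: list of lists representing the obtained sub-tokens fragments.
--     """
--     frag_token, frag_start_end = [[]], [[]]
--     i = 0
--     while i < len(ss_token):
--         assert len(ss_token[i]) <= max_seq_len
--         if len(frag_token[-1]) + len(ss_token[i]) > max_seq_len:
--             # Fragment is full, so create a new empty fragment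
--             frag_token.append([])
--             frag_start_end.append([])
--
--         frag_token[-1].extend(ss_token[i])
--         frag_start_end[-1].extend(ss_start_end[i])
--         i += 1
--
--     return frag_token, frag_start_end
-- ===== SOURCE B (Python) =====
-- def ss_fragment_greedy(ss_token, ss_start_end, max_seq_len):
--     """Two-phase rewrite: first partition sentence indices greedily, then materialize fragments."""
--     groups = [[]]
--     cur = 0
--     for i, tok in enumerate(ss_token):
--         assert len(tok) <= max_seq_len
--         if cur + len(tok) > max_seq_len:
--             groups.append([])
--             cur = 0
--         groups[-1].append(i)
--         cur += len(tok)
--     frag_token = [[t for i in g for t in ss_token[i]] for g in groups]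
--     frag_start_end = [[p for i in g for p in ss_start_end[i]] for g in groups]
--     return frag_token, frag_start_end
-- ===== Notes on version B (the rewrite author's own statement) =====
-- stated objective: alternative
-- what changed: B separates the computation into two phases: a single pass that greedily partitions sentence indices into groups using a running fill counter, then nested comprehensions that materialize the token/offset fragments from those index groups; A instead interleaves fragment construction with the scan, extending the last fragment in place.
import Mathlib
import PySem

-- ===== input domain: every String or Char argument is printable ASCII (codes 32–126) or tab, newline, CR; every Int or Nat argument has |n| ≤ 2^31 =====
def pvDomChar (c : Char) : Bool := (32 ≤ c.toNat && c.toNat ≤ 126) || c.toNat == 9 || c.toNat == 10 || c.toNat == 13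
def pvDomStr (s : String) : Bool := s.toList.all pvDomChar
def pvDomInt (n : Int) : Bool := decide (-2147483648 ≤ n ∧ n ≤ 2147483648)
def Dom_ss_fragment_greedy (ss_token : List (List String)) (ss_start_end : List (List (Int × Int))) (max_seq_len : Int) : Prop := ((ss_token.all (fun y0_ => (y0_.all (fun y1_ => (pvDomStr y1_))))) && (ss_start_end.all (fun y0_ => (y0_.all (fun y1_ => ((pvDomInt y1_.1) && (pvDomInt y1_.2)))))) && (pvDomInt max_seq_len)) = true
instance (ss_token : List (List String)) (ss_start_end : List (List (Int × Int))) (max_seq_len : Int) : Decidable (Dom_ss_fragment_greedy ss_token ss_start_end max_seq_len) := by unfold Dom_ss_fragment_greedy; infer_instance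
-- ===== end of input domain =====

-- B separates partitioning (one pass computing greedy index groups with a running fill counter)
-- from materialization (flattening each group's sentences); A interleaves both, extending the
-- last fragment in place.  Objective: alternative decomposition; equivalence on Pre_ is proved.

-- ===== PORT A =====
-- `frag[-1].extend(x)` / the in-place growth of the last list
def pvExtLast {α : Type} (l : List (List α)) (x : List α) : List (List α) :=
  l.dropLast ++ [l.getLastD [] ++ x]

-- one iteration of A's while loop (the assert is vacuous inside Pre_)
def ssfgAStep (max_seq_len : Int) (st : List (List String) × List (List (Int × Int)))
    (p : List String × List (Int × Int)) : List (List String) × List (List (Int × Int)) :=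
  let st1 := if ((st.1.getLastD []).length : Int) + (p.1.length : Int) > max_seq_len
             then (st.1 ++ [[]], st.2 ++ [[]]) else st
  (pvExtLast st1.1 p.1, pvExtLast st1.2 p.2)

def ss_fragment_greedy (ss_token : List (List String)) (ss_start_end : List (List (Int × Int))) (max_seq_len : Int) : List (List String) × (List (List (Int × Int))) :=
  (ss_token.zip ss_start_end).foldl (ssfgAStep max_seq_len) ([[]], [[]])

-- ===== PORT B =====
-- one iteration of B's phase-1 loop over enumerate(ss_token)
def ssfgBStep (max_seq_len : Int) (st : List (List Int) × Int) (it : Int × List String) :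
    List (List Int) × Int :=
  let st1 := if st.2 + (it.2.length : Int) > max_seq_len then (st.1 ++ [[]], (0 : Int)) else st
  (pvExtLast st1.1 [it.1], st1.2 + (it.2.length : Int))

-- phase-2 comprehension: [x for i in g for x in src[i]]
def pvGather {α : Type} (src : List (List α)) (g : List Int) : List α :=
  g.flatMap (fun i => PySem.List.pyGetD src i [])

def ss_fragment_greedy_alt (ss_token : List (List String)) (ss_start_end : List (List (Int × Int))) (max_seq_len : Int) : List (List String) × (List (List (Int × Int))) :=
  let groups := ((PySem.List.enumerate ss_token).foldl (ssfgBStep max_seq_len) ([[]], 0)).1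
  (groups.map (pvGather ss_token), groups.map (pvGather ss_start_end))

-- ===== PRECONDITION & SPEC =====
-- Pre_ excludes exactly the inputs where A raises: an AssertionError when some sentence has more
-- than max_seq_len sub-tokens, and an IndexError when ss_start_end is shorter than ss_token.
def Pre_ss_fragment_greedy (ss_token : List (List String)) (ss_start_end : List (List (Int × Int))) (max_seq_len : Int) : Prop :=
  ss_token.length ≤ ss_start_end.length ∧ ∀ t ∈ ss_token, (t.length : Int) ≤ max_seq_len
instance (ss_token : List (List String)) (ss_start_end : List (List (Int × Int))) (max_seq_len : Int) : Decidable (Pre_ss_fragment_greedy ss_token ss_start_end max_seq_len) := by unfold Pre_ss_fragment_greedy; infer_instance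

def pvWitness_ss_fragment_greedy : List (List String) × (List (List (Int × Int))) × Int :=
  ([["a"], ["bb", "c"]], [[(0, 1)], [(1, 2), (2, 3)]], 2)

def Spec_ss_fragment_greedy (ss_token : List (List String)) (ss_start_end : List (List (Int × Int))) (max_seq_len : Int) (out : List (List String) × (List (List (Int × Int)))) : Prop := out = ss_fragment_greedy_alt ss_token ss_start_end max_seq_len
instance (ss_token : List (List String)) (ss_start_end : List (List (Int × Int))) (max_seq_len : Int) (out : List (List String) × (List (List (Int × Int)))) : Decidable (Spec_ss_fragment_greedy ss_token ss_start_end max_seq_len out) := by unfold Spec_ss_fragment_greedy; infer_instance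

-- ===== CLAIM (what is proved, stated in full; the proofs are below) =====
def Claim_equal_ss_fragment_greedy : Prop := ∀ (ss_token : List (List String)) (ss_start_end : List (List (Int × Int))) (max_seq_len : Int), Dom_ss_fragment_greedy ss_token ss_start_end max_seq_len → Pre_ss_fragment_greedy ss_token ss_start_end max_seq_len → Spec_ss_fragment_greedy ss_token ss_start_end max_seq_len (ss_fragment_greedy ss_token ss_start_end max_seq_len)

-- ===== LEMMAS AND PROOFS =====

theorem pv_getLastD_map {α β : Type} (f : List α → List β) (hF : f [] = []) (l : List (List α)) :
    (l.map f).getLastD [] = f (l.getLastD []) := by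
  induction l with
  | nil => simpa using hF.symm
  | cons x xs ih =>
    cases xs with
    | nil => rfl
    | cons y ys => simpa using ih

theorem pv_extLast_map {α β : Type} (f : List α → List β)
    (hF : ∀ a b, f (a ++ b) = f a ++ f b) (l : List (List α)) (g : List α) :
    pvExtLast (l.map f) (f g) = (pvExtLast l g).map f := by
  have h0 : f [] = [] := by
    have := hF [] []; simpa using this.symm
  simp only [pvExtLast, List.map_append, List.map_cons, List.map_nil,
    pv_getLastD_map f h0, hF, List.map_dropLast]

theorem pv_getLastD_extLast {α : Type} (l : List (List α)) (x : List α) :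
    (pvExtLast l x).getLastD [] = l.getLastD [] ++ x := by
  simp [pvExtLast]

theorem pvGather_append (α : Type) (src : List (List α)) (a b : List Int) :
    pvGather src (a ++ b) = pvGather src a ++ pvGather src b := by
  simp [pvGather]

-- main invariant: A's interleaved fold equals mapping pvGather over B's index groups
theorem ssfg_main (m : Int) (tok : List (List String)) (se : List (List (Int × Int)))
    (hlen : tok.length ≤ se.length) :
    ∀ (lt : List (List String)) (ls : List (List (Int × Int))) (k : Nat)
      (G : List (List Int)) (cur : Int),
      tok.drop k = lt → se.drop k = ls → G ≠ [] →
      cur = ((pvGather tok (G.getLastD [])).length : Int) →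
      (lt.zip ls).foldl (ssfgAStep m) (G.map (pvGather tok), G.map (pvGather se)) =
        (let G' := ((PySem.List.enumerate lt (k : Int)).foldl (ssfgBStep m) (G, cur)).1
         (G'.map (pvGather tok), G'.map (pvGather se))) := by
  intro lt
  induction lt with
  | nil =>
    intro ls k G cur _ _ _ _
    simp [PySem.List.enumerate]
  | cons x lt ih =>
    intro ls k G cur htok hse hG hcur
    -- the se-suffix is nonempty
    have hklt : k < tok.length := by
      by_contra h
      have : tok.drop k = [] := List.drop_eq_nil_of_le (by omega)
      rw [this] at htok; exact absurd htok (by simp)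
    have hkse : k < se.length := lt_of_lt_of_le hklt hlen
    obtain ⟨y, ls', rfl⟩ : ∃ y ls', ls = y :: ls' := by
      cases ls with
      | nil =>
        exfalso
        have h0 : (se.drop k).length = 0 := by rw [hse]; rfl
        rw [List.length_drop] at h0
        omega
      | cons y ls' => exact ⟨y, ls', rfl⟩
    -- index facts
    have hx : tok[k]? = some x := by
      have : (tok.drop k)[0]? = some x := by simp [htok]
      simpa using this
    have hdrop1 : tok.drop (k + 1) = lt := by
      have : tok.drop (k + 1) = (tok.drop k).drop 1 := by
        rw [List.drop_drop]
      rw [this, htok]; rfl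
    have hdrop2 : se.drop (k + 1) = ls' := by
      have : se.drop (k + 1) = (se.drop k).drop 1 := by
        rw [List.drop_drop]
      rw [this, hse]; rfl
    have hgx : pvGather tok [(k : Int)] = x := by
      simp [pvGather, PySem.List.pyGetD_natCast, List.getD, hx]
    have happ : ∀ a b : List Int, pvGather tok (a ++ b) = pvGather tok a ++ pvGather tok b :=
      pvGather_append _ tok
    have happse : ∀ a b : List Int, pvGather se (a ++ b) = pvGather se a ++ pvGather se b :=
      pvGather_append _ se
    have hnil : pvGather tok ([] : List Int) = [] := by simp [pvGather]
    have hnilse : pvGather se ([] : List Int) = [] := by simp [pvGather]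
    -- unfold one step of both folds
    rw [show (x :: lt).zip (y :: ls') = (x, y) :: lt.zip ls' from rfl,
        PySem.List.enumerate_cons]
    simp only [List.foldl_cons]
    -- both guards agree
    have hguard : (((G.map (pvGather tok)).getLastD []).length : Int) + (x.length : Int) > m ↔
        cur + (x.length : Int) > m := by
      rw [pv_getLastD_map _ hnil, hcur]
    by_cases hc : cur + (x.length : Int) > m
    · -- new fragment is opened
      have hstepA : ssfgAStep m (G.map (pvGather tok), G.map (pvGather se)) (x, y) =
          ((pvExtLast (G ++ [[]]) [(k : Int)]).map (pvGather tok),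
           (pvExtLast (G ++ [[]]) [(k : Int)]).map (pvGather se)) := by
        simp only [ssfgAStep]
        rw [if_pos (hguard.mpr hc)]
        have h1 : G.map (pvGather tok) ++ [[]] = (G ++ [[]]).map (pvGather tok) := by
          simp [hnil]
        have h2 : G.map (pvGather se) ++ [[]] = (G ++ [[]]).map (pvGather se) := by
          simp [hnilse]
        have hy : pvGather se [(k : Int)] = y := by
          have hyg : se[k]? = some y := by
            have : (se.drop k)[0]? = some y := by simp [hse]
            simpa using this
          simp [pvGather, PySem.List.pyGetD_natCast, List.getD, hyg]
        dsimp only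
        rw [h1, h2, ← hgx, ← hy, pv_extLast_map _ happ, pv_extLast_map _ happse]
      have hstepB : ssfgBStep m (G, cur) ((k : Int), x) =
          (pvExtLast (G ++ [[]]) [(k : Int)], 0 + (x.length : Int)) := by
        simp only [ssfgBStep]
        rw [if_pos hc]
      rw [hstepA, hstepB]
      exact ih ls' (k + 1) (pvExtLast (G ++ [[]]) [(k : Int)]) (0 + (x.length : Int))
        hdrop1 hdrop2
        (by simp [pvExtLast])
        (by rw [pv_getLastD_extLast]
            simp [hgx])
    · -- current fragment continues
      have hstepA : ssfgAStep m (G.map (pvGather tok), G.map (pvGather se)) (x, y) =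
          ((pvExtLast G [(k : Int)]).map (pvGather tok),
           (pvExtLast G [(k : Int)]).map (pvGather se)) := by
        simp only [ssfgAStep]
        rw [if_neg (fun h => hc (hguard.mp h))]
        have hy : pvGather se [(k : Int)] = y := by
          have hyg : se[k]? = some y := by
            have : (se.drop k)[0]? = some y := by simp [hse]
            simpa using this
          simp [pvGather, PySem.List.pyGetD_natCast, List.getD, hyg]
        dsimp only
        rw [← hgx, ← hy, pv_extLast_map _ happ, pv_extLast_map _ happse]
      have hstepB : ssfgBStep m (G, cur) ((k : Int), x) =
          (pvExtLast G [(k : Int)], cur + (x.length : Int)) := by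
        simp only [ssfgBStep]
        rw [if_neg hc]
      rw [hstepA, hstepB]
      exact ih ls' (k + 1) (pvExtLast G [(k : Int)]) (cur + (x.length : Int))
        hdrop1 hdrop2
        (by simp [pvExtLast])
        (by rw [pv_getLastD_extLast, happ, hgx, hcur]
            simp)

-- ===== VERDICT (by name: the statement is the Claim_ definition above) =====
theorem ss_fragment_greedy_spec : Claim_equal_ss_fragment_greedy := by
  intro tok se m _ hpre
  unfold Spec_ss_fragment_greedy ss_fragment_greedy ss_fragment_greedy_alt
  have h := ssfg_main m tok se hpre.1 tok se 0 [[]] 0 (by simp) (by simp)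
    (by simp) (by simp [pvGather])
  simpa [pvGather, PySem.List.enumerate] using h
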